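-- pv_equiv track=rewrite | github.com/xuexiba0320/Warehouse | APQ/API不使用Scrapy测试-2.py | get_year_months
-- ===== SOURCE A (Python) =====
-- def get_year_months(start_year, start_month, end_year, end_month):
--     start_year, start_month, end_year, end_month = [int(i) for i in [start_year, start_month, end_year, end_month]]
--     year_months = []
--     if start_year < end_year:
--         for year in range(start_year, end_year + 1):
--             if year == start_year:
--                 if start_month > 12 or start_month < 1:
--                     raise ValueError
--                 else:
--                     for month in range(start_month, 13):
--                         year_months.append(year * 100 + month)
--             elif year == end_year:
--                 if end_month > 12 or end_month < 1:
--                     raise ValueError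
--                 else:
--                     for month in range(1, end_month + 1):
--                         year_months.append(year * 100 + month)
--             else:
--                 for month in range(1, 13):
--                     year_months.append(year * 100 + month)
--     elif start_year == end_year:
--         if start_month <= end_month:
--             for month in range(start_month, end_month + 1):
--                 year_months.append(start_year * 100 + month)
--
--     return year_months
-- ===== SOURCE B (Python) =====
-- def get_year_months(start_year, start_month, end_year, end_month):
--     start_year, start_month, end_year, end_month = int(start_year), int(start_month), int(end_year), int(end_month)
--     if start_year < end_year:
--         if not (1 <= start_month <= 12) or not (1 <= end_month <= 12):
--             raise ValueError
--         start = start_year * 12 + (start_month - 1)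
--         end = end_year * 12 + (end_month - 1)
--         return [(i // 12) * 100 + i % 12 + 1 for i in range(start, end + 1)]
--     if start_year == end_year:
--         return [start_year * 100 + m for m in range(start_month, end_month + 1)]
--     return []
-- ===== Notes on version B (the rewrite author's own statement) =====
-- stated objective: simpler
-- what changed: Replaces the three-way per-year branch with nested month loops by one flat loop over an absolute month index (year*12+month-1), decoding each index with divmod by 12.
import Mathlib
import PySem

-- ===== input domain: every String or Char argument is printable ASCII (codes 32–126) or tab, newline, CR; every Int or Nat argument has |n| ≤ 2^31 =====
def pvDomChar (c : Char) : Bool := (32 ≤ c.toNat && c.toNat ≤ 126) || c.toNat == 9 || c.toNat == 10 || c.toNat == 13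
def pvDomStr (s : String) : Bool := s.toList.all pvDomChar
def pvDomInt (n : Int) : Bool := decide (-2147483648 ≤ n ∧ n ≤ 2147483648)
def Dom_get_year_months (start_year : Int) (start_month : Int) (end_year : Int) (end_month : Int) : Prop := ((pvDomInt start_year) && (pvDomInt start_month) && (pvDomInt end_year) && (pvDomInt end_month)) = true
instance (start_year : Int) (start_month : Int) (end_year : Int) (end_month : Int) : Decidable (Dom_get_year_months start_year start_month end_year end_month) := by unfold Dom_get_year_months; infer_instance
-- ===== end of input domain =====

-- B replaces the three-way per-year branch with nested month loops by one flat loop over an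
-- absolute month index (year*12+month-1), decoded by divmod 12: a simpler decomposition, same cost.


-- ===== PORT A =====
def get_year_months (start_year : Int) (start_month : Int) (end_year : Int) (end_month : Int) : List Int :=
  if start_year < end_year then
    (PySem.List.pyRange start_year (end_year + 1) 1).foldl (fun year_months year =>
      if year = start_year then
        if start_month > 12 ∨ start_month < 1 then year_months  -- Python: raise ValueError (excluded by Pre_)
        else (PySem.List.pyRange start_month 13 1).foldl (fun ym m => ym ++ [year * 100 + m]) year_months
      else if year = end_year then
        if end_month > 12 ∨ end_month < 1 then year_months      -- Python: raise ValueError (excluded by Pre_)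
        else (PySem.List.pyRange 1 (end_month + 1) 1).foldl (fun ym m => ym ++ [year * 100 + m]) year_months
      else (PySem.List.pyRange 1 13 1).foldl (fun ym m => ym ++ [year * 100 + m]) year_months) []
  else if start_year = end_year then
    if start_month ≤ end_month then
      (PySem.List.pyRange start_month (end_month + 1) 1).foldl (fun ym m => ym ++ [start_year * 100 + m]) []
    else []
  else []

-- ===== PORT B =====
def get_year_months_alt (start_year : Int) (start_month : Int) (end_year : Int) (end_month : Int) : List Int :=
  if start_year < end_year then
    if ¬(1 ≤ start_month ∧ start_month ≤ 12) ∨ ¬(1 ≤ end_month ∧ end_month ≤ 12) then []  -- Python: raise ValueError (excluded by Pre_)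
    else
      (PySem.List.pyRange (start_year * 12 + (start_month - 1)) (end_year * 12 + (end_month - 1) + 1) 1).map
        (fun i => PySem.Int.floordiv i 12 * 100 + PySem.Int.mod i 12 + 1)
  else if start_year = end_year then
    (PySem.List.pyRange start_month (end_month + 1) 1).map (fun m => start_year * 100 + m)
  else []

-- ===== PRECONDITION & SPEC =====
-- Pre_ excludes exactly the inputs on which A raises ValueError (cross-year with a month outside 1..12); B raises there too.
def Pre_get_year_months (start_year : Int) (start_month : Int) (end_year : Int) (end_month : Int) : Prop :=
  start_year < end_year → (1 ≤ start_month ∧ start_month ≤ 12 ∧ 1 ≤ end_month ∧ end_month ≤ 12)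
instance (start_year : Int) (start_month : Int) (end_year : Int) (end_month : Int) : Decidable (Pre_get_year_months start_year start_month end_year end_month) := by unfold Pre_get_year_months; infer_instance
def pvWitness_get_year_months : Int × Int × Int × Int := (2020, 11, 2021, 2)
def Spec_get_year_months (start_year : Int) (start_month : Int) (end_year : Int) (end_month : Int) (out : List Int) : Prop := out = get_year_months_alt start_year start_month end_year end_month
instance (start_year : Int) (start_month : Int) (end_year : Int) (end_month : Int) (out : List Int) : Decidable (Spec_get_year_months start_year start_month end_year end_month out) := by unfold Spec_get_year_months; infer_instance

-- ===== CLAIM (what is proved, stated in full; the proofs are below) =====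
def Claim_equal_get_year_months : Prop := ∀ (start_year : Int) (start_month : Int) (end_year : Int) (end_month : Int), Dom_get_year_months start_year start_month end_year end_month → Pre_get_year_months start_year start_month end_year end_month → Spec_get_year_months start_year start_month end_year end_month (get_year_months start_year start_month end_year end_month)

-- ===== LEMMAS AND PROOFS =====

-- decoding an absolute month index: floordiv gives the year, mod the month-1
lemma decode12 (y r : Int) (h0 : 0 ≤ r) (h12 : r < 12) :
    PySem.Int.floordiv (12 * y + r) 12 = y ∧ PySem.Int.mod (12 * y + r) 12 = r := by
  have hq : PySem.Int.floordiv (12 * y + r) 12 = y := by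
    rw [PySem.Int.floordiv_eq_iff_of_pos (by norm_num)]
    constructor <;> nlinarith
  refine ⟨hq, ?_⟩
  have := PySem.Int.floordiv_mul_add_mod (12 * y + r) 12
  rw [hq] at this; omega

-- one calendar year: the decoded flat slice [12y+m1-1, 12y+m2-1) is the month list [m1, m2)
lemma one_year (y m1 m2 : Int) (h1 : 1 ≤ m1) (h2 : m2 ≤ 13) :
    (PySem.List.pyRange (12 * y + m1 - 1) (12 * y + m2 - 1) 1).map
        (fun i => PySem.Int.floordiv i 12 * 100 + PySem.Int.mod i 12 + 1)
      = (PySem.List.pyRange m1 m2 1).map (fun m => y * 100 + m) := by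
  apply List.ext_getElem
  · simp only [List.length_map, PySem.List.length_pyRange_one]
    omega
  · intro k hk1 hk2
    simp only [List.getElem_map, PySem.List.getElem_pyRange_one]
    simp [PySem.List.length_pyRange_one] at hk1
    have hr : (0 : Int) ≤ m1 - 1 + k ∧ (m1 - 1 + (k : Int)) < 12 := by omega
    have hd := decode12 y (m1 - 1 + k) hr.1 hr.2
    have he : 12 * y + m1 - 1 + (k : Int) = 12 * y + (m1 - 1 + k) := by ring
    rw [he]
    simp only [hd.1, hd.2]
    omega

-- a run of n whole years starting at year a, as a flatMap of full-year month lists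
lemma whole_years (n : Nat) : ∀ (a : Int),
    (PySem.List.pyRange (12 * a) (12 * (a + (n : Int))) 1).map
        (fun i => PySem.Int.floordiv i 12 * 100 + PySem.Int.mod i 12 + 1)
      = (PySem.List.pyRange a (a + (n : Int)) 1).flatMap
          (fun y => (PySem.List.pyRange 1 13 1).map (fun m => y * 100 + m)) := by
  induction n with
  | zero =>
    intro a
    simp [PySem.List.pyRange_one_eq_nil]
  | succ n ih =>
    intro a
    have hsplit := PySem.List.pyRange_one_append (12 * a) (12 * (a + 1)) (12 * (a + ((n : Int) + 1)))
      (by omega) (by omega)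
    have hsplit2 := PySem.List.pyRange_one_append a (a + 1) (a + ((n : Int) + 1)) (by omega) (by omega)
    push_cast
    rw [hsplit, hsplit2, List.map_append, List.flatMap_append]
    congr 1
    · have h1 := one_year a 1 13 (le_refl 1) (le_refl 13)
      have e1 : 12 * a + 1 - 1 = 12 * a := by ring
      have e2 : 12 * a + 13 - 1 = 12 * (a + 1) := by ring
      rw [e1, e2] at h1
      rw [h1, PySem.List.pyRange_one_singleton]
      simp
    · have := ih (a + 1)
      have e3 : a + 1 + (n : Int) = a + ((n : Int) + 1) := by ring
      rw [e3] at this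
      exact this

-- the append-one-at-a-time inner month loop of A is a map
lemma inner_loop (y : Int) (l : List Int) (acc : List Int) :
    l.foldl (fun ym m => ym ++ [y * 100 + m]) acc = acc ++ l.map (fun m => y * 100 + m) := by
  simpa using PySem.List.foldl_append_singleton_eq_map (fun m => y * 100 + m) l acc

theorem get_year_months_spec : Claim_equal_get_year_months := by
  intro sy sm ey em _hdom hpre
  unfold Spec_get_year_months get_year_months get_year_months_alt
  by_cases hlt : sy < ey
  · obtain ⟨h1, h2, h3, h4⟩ := hpre hlt
    simp only [if_pos hlt]
    rw [if_neg (by omega)]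
    -- decompose A's year loop: [sy] ++ middle ++ [ey]
    have hy1 := PySem.List.pyRange_one_append sy (sy + 1) (ey + 1) (by omega) (by omega)
    have hy2 := PySem.List.pyRange_one_append (sy + 1) ey (ey + 1) (by omega) (by omega)
    rw [hy1, hy2, PySem.List.pyRange_one_singleton, List.foldl_append, List.foldl_append]
    -- first year
    have e1 : List.foldl (fun (year_months : List Int) year =>
      if year = sy then
        if sm > 12 ∨ sm < 1 then year_months
        else (PySem.List.pyRange sm 13 1).foldl (fun ym m => ym ++ [year * 100 + m]) year_months
      else if year = ey then
        if em > 12 ∨ em < 1 then year_months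
        else (PySem.List.pyRange 1 (em + 1) 1).foldl (fun ym m => ym ++ [year * 100 + m]) year_months
      else (PySem.List.pyRange 1 13 1).foldl (fun ym m => ym ++ [year * 100 + m]) year_months) [] [sy]
        = (PySem.List.pyRange sm 13 1).map (fun m => sy * 100 + m) := by
      simp only [List.foldl_cons, List.foldl_nil, if_true]
      rw [if_neg (by omega), inner_loop]
      simp
    rw [e1]
    -- middle years
    have e2 : ∀ acc : List Int, List.foldl (fun (year_months : List Int) year =>
      if year = sy then
        if sm > 12 ∨ sm < 1 then year_months
        else (PySem.List.pyRange sm 13 1).foldl (fun ym m => ym ++ [year * 100 + m]) year_months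
      else if year = ey then
        if em > 12 ∨ em < 1 then year_months
        else (PySem.List.pyRange 1 (em + 1) 1).foldl (fun ym m => ym ++ [year * 100 + m]) year_months
      else (PySem.List.pyRange 1 13 1).foldl (fun ym m => ym ++ [year * 100 + m]) year_months) acc (PySem.List.pyRange (sy + 1) ey 1)
        = acc ++ (PySem.List.pyRange (sy + 1) ey 1).flatMap
            (fun y => (PySem.List.pyRange 1 13 1).map (fun m => y * 100 + m)) := by
      intro acc
      rw [PySem.List.foldl_congr_mem _ _
        (fun acc y => acc ++ (PySem.List.pyRange 1 13 1).map (fun m => y * 100 + m)) _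
        (by
          intro acc y hy
          rw [PySem.List.mem_pyRange_one] at hy
          rw [if_neg (by omega), if_neg (by omega)]
          exact inner_loop y _ acc)]
      exact PySem.List.foldl_append_eq_flatMap _ _ _
    rw [e2]
    -- last year
    have e3 : ∀ acc : List Int, List.foldl (fun (year_months : List Int) year =>
      if year = sy then
        if sm > 12 ∨ sm < 1 then year_months
        else (PySem.List.pyRange sm 13 1).foldl (fun ym m => ym ++ [year * 100 + m]) year_months
      else if year = ey then
        if em > 12 ∨ em < 1 then year_months
        else (PySem.List.pyRange 1 (em + 1) 1).foldl (fun ym m => ym ++ [year * 100 + m]) year_months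
      else (PySem.List.pyRange 1 13 1).foldl (fun ym m => ym ++ [year * 100 + m]) year_months) acc (PySem.List.pyRange ey (ey + 1) 1)
        = acc ++ (PySem.List.pyRange 1 (em + 1) 1).map (fun m => ey * 100 + m) := by
      intro acc
      rw [PySem.List.pyRange_one_singleton]
      simp only [List.foldl_cons, List.foldl_nil, if_true]
      rw [if_neg (show ¬(ey = sy) from by omega), if_neg (by omega), inner_loop]
    rw [e3]
    -- B's flat range, split at the same year boundaries
    have hb1 := PySem.List.pyRange_one_append (sy * 12 + (sm - 1)) (12 * (sy + 1)) (ey * 12 + (em - 1) + 1)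
      (by omega) (by nlinarith)
    have hb2 := PySem.List.pyRange_one_append (12 * (sy + 1)) (12 * ey) (ey * 12 + (em - 1) + 1)
      (by nlinarith) (by omega)
    rw [hb1, hb2, List.map_append, List.map_append]
    -- head piece
    have hh := one_year sy sm 13 h1 (le_refl 13)
    rw [show 12 * sy + sm - 1 = sy * 12 + (sm - 1) from by ring,
        show 12 * sy + 13 - 1 = 12 * (sy + 1) from by ring] at hh
    -- tail piece
    have ht := one_year ey 1 (em + 1) (le_refl 1) (by omega)
    rw [show 12 * ey + 1 - 1 = 12 * ey from by ring,
        show 12 * ey + (em + 1) - 1 = ey * 12 + (em - 1) + 1 from by ring] at ht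
    -- middle piece
    have hm := whole_years (ey - (sy + 1)).toNat (sy + 1)
    rw [show (sy + 1) + ((ey - (sy + 1)).toNat : Int) = ey from by omega] at hm
    rw [hh, hm, ht]
    simp [List.append_assoc]
  · simp only [if_neg hlt]
    by_cases heq : sy = ey
    · simp only [if_pos heq]
      by_cases hle : sm ≤ em
      · rw [if_pos hle, inner_loop]; simp
      · rw [if_neg hle, PySem.List.pyRange_one_eq_nil (by omega)]; simp
    · simp [if_neg heq]
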